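-- pv_equiv track=rewrite | github.com/981377660LMT/algorithm-study | 1_stack/单调栈/3638. 平衡装运的最大数量-单调栈优化dp.py | maxBalancedShipments
-- ===== SOURCE A (Python) =====
-- from typing import List
--
-- def getLeftGreater(nums: List[int]) -> List[int]:
--     n = len(nums)
--     leftGreater = [-1] * n
--     stack = []
--     for i in range(n):
--         while stack and nums[stack[-1]] <= nums[i]:
--             stack.pop()
--         leftGreater[i] = stack[-1] if stack else -1
--         stack.append(i)
--     return leftGreater
--
-- def maxBalancedShipments(weight: List[int]) -> int:
--     n = len(weight)
--     leftGreater = getLeftGreater(weight)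
--     dp = [0] * (n + 1)
--     for i in range(1, n + 1):
--         dp[i] = dp[i - 1]
--         if leftGreater[i - 1] != -1:
--             dp[i] = max(dp[i], dp[leftGreater[i - 1]] + 1)
--     return dp[n]
-- ===== SOURCE B (Python) =====
-- def maxBalancedShipments(weight):
--     cnt = 0
--     cur = None  # max of the currently open segment; None = no open segment
--     for w in weight:
--         if cur is not None and w < cur:
--             cnt += 1
--             cur = None
--         else:
--             cur = w
--     return cnt
-- ===== Notes on version B (the rewrite author's own statement) =====
-- stated objective: simpler
-- what changed: Replaces the monotonic-stack nearest-greater pass plus O(n) DP table by a single greedy scan keeping only a running segment maximum and a counter, closing a shipment at each strict descent.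
import Mathlib
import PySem

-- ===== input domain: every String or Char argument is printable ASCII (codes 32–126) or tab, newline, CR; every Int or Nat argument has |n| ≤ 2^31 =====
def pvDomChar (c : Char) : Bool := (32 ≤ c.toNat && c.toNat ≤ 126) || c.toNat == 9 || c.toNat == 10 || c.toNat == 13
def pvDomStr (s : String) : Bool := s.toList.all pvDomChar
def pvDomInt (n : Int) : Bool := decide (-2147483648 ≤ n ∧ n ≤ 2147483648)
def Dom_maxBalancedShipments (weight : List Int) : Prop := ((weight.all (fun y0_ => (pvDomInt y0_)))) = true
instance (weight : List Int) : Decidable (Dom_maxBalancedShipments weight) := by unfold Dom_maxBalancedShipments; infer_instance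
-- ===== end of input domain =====

-- B replaces the monotonic-stack + DP-table algorithm by a one-pass greedy scan
-- (counter + running segment maximum); simpler, O(1) extra space. Equal return values proved.

-- ===== PORT A =====
-- the `while stack and nums[stack[-1]] <= nums[i]: stack.pop()` loop (stack head = top);
-- nums[stack[-1]] is always in range in Python, so getD is exact
def pvPopA (nums : List Int) (x : Int) : List Nat → List Nat
  | [] => []
  | t :: rest => if nums.getD t 0 ≤ x then pvPopA nums x rest else t :: rest

-- one iteration of the `for i in range(n)` loop of getLeftGreater
def glgStep (nums : List Int) (st : List Int × List Nat) (i : Nat) : List Int × List Nat :=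
  let stack := pvPopA nums (nums.getD i 0) st.2
  (st.1.set i (match stack.head? with | none => -1 | some t => (t : Int)), i :: stack)

def getLeftGreater (nums : List Int) : List Int :=
  ((List.range nums.length).foldl (glgStep nums)
    (List.replicate nums.length (-1), [])).1

-- one iteration of the `for i in range(1, n + 1)` dp loop (i0 = i - 1)
def dpStep (leftGreater : List Int) (dp : List Int) (i0 : Nat) : List Int :=
  let i := i0 + 1
  let v := dp.getD (i - 1) 0
  let g := leftGreater.getD (i - 1) 0
  let v := if g ≠ -1 then max v (dp.getD g.toNat 0 + 1) else v
  dp.set i v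

def maxBalancedShipments (weight : List Int) : Int :=
  let n := weight.length
  let leftGreater := getLeftGreater weight
  let dp := (List.range n).foldl (dpStep leftGreater) (List.replicate (n + 1) 0)
  dp.getD n 0

-- ===== PORT B =====
-- loop body of Source B: state = (cnt, cur)
def gStep (st : Int × Option Int) (x : Int) : Int × Option Int :=
  match st.2 with
  | some m => if x < m then (st.1 + 1, none) else (st.1, some x)
  | none => (st.1, some x)

def maxBalancedShipments_alt (weight : List Int) : Int :=
  (weight.foldl gStep (0, none)).1

-- ===== PRECONDITION & SPEC =====
def Spec_maxBalancedShipments (weight : List Int) (out : Int) : Prop := out = maxBalancedShipments_alt weight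
instance (weight : List Int) (out : Int) : Decidable (Spec_maxBalancedShipments weight out) := by unfold Spec_maxBalancedShipments; infer_instance

-- ===== CLAIM (what is proved, stated in full; the proofs are below) =====
def Claim_equal_maxBalancedShipments : Prop := ∀ (weight : List Int), Dom_maxBalancedShipments weight → Spec_maxBalancedShipments weight (maxBalancedShipments weight)

-- ===== LEMMAS AND PROOFS =====

-- value at index j (all concrete accesses are in range)
def wf (nums : List Int) : Nat → Int := fun j => nums.getD j 0

-- nearest index j < i with x < w j, scanning downward
def ngAux (w : Nat → Int) (x : Int) : Nat → Option Nat
  | 0 => none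
  | j+1 => if x < w j then some j else ngAux w x j

def ngF (w : Nat → Int) (i : Nat) : Option Nat := ngAux w (w i) i

-- the stack contents after processing indices 0..i-1
def canonStack (nums : List Int) : Nat → List Nat
  | 0 => []
  | i+1 => i :: pvPopA nums (nums.getD i 0) (canonStack nums i)

theorem pvPopA_pvPopA (nums : List Int) (x y : Int) (s : List Nat) (h : y ≤ x) :
    pvPopA nums x (pvPopA nums y s) = pvPopA nums x s := by
  induction s with
  | nil => rfl
  | cons t rest ih =>
      simp only [pvPopA]
      by_cases ht : nums.getD t 0 ≤ y
      · rw [if_pos ht, if_pos (le_trans ht h), ih]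
      · rw [if_neg ht]
        simp only [pvPopA]

theorem head_pop_canon (nums : List Int) :
    ∀ i x, (pvPopA nums x (canonStack nums i)).head? = ngAux (wf nums) x i := by
  intro i
  induction i with
  | zero => intro x; rfl
  | succ i ih =>
      intro x
      simp only [canonStack, pvPopA, ngAux]
      by_cases h : x < wf nums i
      · have hni : ¬ nums.getD i 0 ≤ x := by simpa [wf] using not_le.mpr h
        rw [if_neg hni, if_pos h, List.head?_cons]
      · have h' : nums.getD i 0 ≤ x := by simpa [wf] using not_lt.mp h
        rw [if_pos h', pvPopA_pvPopA nums x (nums.getD i 0) _ h', ih x, if_neg h]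

theorem ngAux_some {w : Nat → Int} {x : Int} :
    ∀ {i j}, ngAux w x i = some j → j < i ∧ x < w j ∧ ∀ k, j < k → k < i → w k ≤ x := by
  intro i
  induction i with
  | zero => intro j h; simp [ngAux] at h
  | succ i ih =>
      intro j h
      simp only [ngAux] at h
      by_cases hx : x < w i
      · rw [if_pos hx] at h
        cases h
        exact ⟨Nat.lt_succ_self i, hx, fun k hk1 hk2 => absurd hk2 (by omega)⟩
      · rw [if_neg hx] at h
        obtain ⟨h1, h2, h3⟩ := ih h
        refine ⟨by omega, h2, fun k hk1 hk2 => ?_⟩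
        rcases Nat.lt_or_ge k i with hk | hk
        · exact h3 k hk1 hk
        · have : k = i := by omega
          subst this; exact not_lt.mp hx
  
theorem ngAux_none {w : Nat → Int} {x : Int} :
    ∀ {i}, ngAux w x i = none → ∀ j, j < i → w j ≤ x := by
  intro i
  induction i with
  | zero => intro _ j hj; omega
  | succ i ih =>
      intro h j hj
      simp only [ngAux] at h
      by_cases hx : x < w i
      · rw [if_pos hx] at h; cases h
      · rw [if_neg hx] at h
        rcases Nat.lt_or_ge j i with hk | hk
        · exact ih h j hk
        · have : j = i := by omega
          subst this; exact not_lt.mp hx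

-- encoding of the nearest-greater index as stored in leftGreater
def lgEnc (nums : List Int) (i : Nat) : Int :=
  match ngF (wf nums) i with | none => -1 | some j => (j : Int)

theorem glg_inv (nums : List Int) :
    ∀ m, m ≤ nums.length →
      ((List.range m).foldl (glgStep nums) (List.replicate nums.length (-1), [])).2
          = canonStack nums m ∧
      ((List.range m).foldl (glgStep nums) (List.replicate nums.length (-1), [])).1.length
          = nums.length ∧
      ∀ i, i < nums.length →
          ((List.range m).foldl (glgStep nums) (List.replicate nums.length (-1), [])).1.getD i 0
          = if i < m then lgEnc nums i else -1 := by
  intro m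
  induction m with
  | zero =>
      intro _
      refine ⟨rfl, by simp, fun i hi => ?_⟩
      simp [List.getD, hi]
  | succ m ih =>
      intro hm
      obtain ⟨h2, hlen, h1⟩ := ih (by omega)
      rw [List.range_succ, List.foldl_append]
      set st := (List.range m).foldl (glgStep nums) (List.replicate nums.length (-1), []) with hst
      simp only [List.foldl_cons, List.foldl_nil]
      refine ⟨?_, ?_, ?_⟩
      · simp only [glgStep, h2, canonStack]
      · simp only [glgStep]; simpa using hlen
      · intro i hi
        simp only [glgStep, h2]
        have hhead : (pvPopA nums (nums.getD m 0) (canonStack nums m)).head?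
            = ngF (wf nums) m := head_pop_canon nums m (nums.getD m 0)
        by_cases hie : i = m
        · subst hie
          rw [List.getD, List.getElem?_set_self (by omega), Option.getD_some]
          rw [hhead]
          simp only [lgEnc, if_pos (Nat.lt_succ_self i)]
        · rw [List.getD, List.getElem?_set_ne (by omega)]
          have := h1 i hi
          rw [List.getD] at this
          rw [this]
          by_cases h3 : i < m
          · rw [if_pos h3, if_pos (by omega)]
          · rw [if_neg h3, if_neg (by omega)]

theorem getLeftGreater_getD (nums : List Int) (i : Nat) (hi : i < nums.length) :
    (getLeftGreater nums).getD i 0 = lgEnc nums i := by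
  have := (glg_inv nums nums.length le_rfl).2.2 i hi
  simpa [getLeftGreater, hi] using this

theorem ngF_lt {w : Nat → Int} {i j : Nat} (h : ngF w i = some j) : j < i :=
  (ngAux_some h).1

def dpF (w : Nat → Int) : Nat → Int
  | 0 => 0
  | i+1 =>
    match ngF w i with
    | none => dpF w i
    | some j => max (dpF w i) (dpF w (min j i) + 1)
  termination_by i => i
  decreasing_by all_goals omega

theorem dpF_zero (w : Nat → Int) : dpF w 0 = 0 := by rw [dpF]

theorem dpF_succ_none {w : Nat → Int} {i : Nat} (h : ngF w i = none) :
    dpF w (i+1) = dpF w i := by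
  rw [dpF, h]

theorem dpF_succ_some {w : Nat → Int} {i j : Nat} (h : ngF w i = some j) :
    dpF w (i+1) = max (dpF w i) (dpF w j + 1) := by
  have hj : j < i := ngF_lt h
  rw [dpF, h]
  simp [Nat.min_eq_left (le_of_lt hj)]

theorem dpF_le_succ (w : Nat → Int) (i : Nat) : dpF w i ≤ dpF w (i+1) := by
  cases h : ngF w i with
  | none => rw [dpF_succ_none h]
  | some j => rw [dpF_succ_some h]; exact le_max_left _ _

theorem dpF_mono (w : Nat → Int) {j k : Nat} (h : j ≤ k) : dpF w j ≤ dpF w k := by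
  induction k with
  | zero => have : j = 0 := by omega
            subst this; exact le_rfl
  | succ k ih =>
      rcases Nat.lt_or_ge j (k+1) with hk | hk
      · exact le_trans (ih (by omega)) (dpF_le_succ w k)
      · have : j = k + 1 := by omega
        subst this; exact le_rfl

theorem dp_inv (weight : List Int) :
    ∀ m, m ≤ weight.length →
      ((List.range m).foldl (dpStep (getLeftGreater weight))
          (List.replicate (weight.length + 1) 0)).length = weight.length + 1 ∧
      ∀ j, ((List.range m).foldl (dpStep (getLeftGreater weight))
          (List.replicate (weight.length + 1) 0)).getD j 0
          = if j ≤ m then dpF (wf weight) j else 0 := by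
  intro m
  induction m with
  | zero =>
      intro _
      refine ⟨by simp, fun j => ?_⟩
      have hz : (List.replicate (weight.length + 1) (0 : Int)).getD j 0 = 0 := by
        rw [List.getD, List.getElem?_replicate]
        split <;> rfl
      rw [List.range_zero, List.foldl_nil, hz]
      by_cases h : j = 0
      · subst h; rw [if_pos (le_refl 0), dpF_zero]
      · rw [if_neg (by omega)]
  | succ m ih =>
      intro hm
      obtain ⟨hlen, h1⟩ := ih (by omega)
      rw [List.range_succ, List.foldl_append]
      set dp := (List.range m).foldl (dpStep (getLeftGreater weight))
          (List.replicate (weight.length + 1) 0) with hdp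
      simp only [List.foldl_cons, List.foldl_nil]
      have hmL : m < weight.length := by omega
      have hlem : dp.getD m 0 = dpF (wf weight) m := by rw [h1 m]; simp
      have hglg : (getLeftGreater weight).getD m 0 = lgEnc weight m :=
        getLeftGreater_getD weight m hmL
      constructor
      · simp only [dpStep]; simpa using hlen
      · intro j
        simp only [dpStep, Nat.add_sub_cancel]
        by_cases hj : j = m + 1
        · subst hj
          rw [List.getD, List.getElem?_set_self (by omega), Option.getD_some]
          rw [hlem, hglg]
          cases hng : ngF (wf weight) m with
          | none =>
              simp only [lgEnc, hng, ne_eq, not_true_eq_false, if_false,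
                if_pos (le_refl (m + 1))]
              rw [dpF_succ_none hng]
          | some j0 =>
              have hj0 : j0 < m := ngF_lt hng
              have henc : lgEnc weight m = (j0 : Int) := by simp [lgEnc, hng]
              have hne : (j0 : Int) ≠ -1 := by omega
              rw [henc, if_pos hne]
              have : ((j0 : Int)).toNat = j0 := rfl
              rw [this, h1 j0, if_pos (by omega), dpF_succ_some hng,
                if_pos (le_refl (m + 1))]
        · rw [List.getD, List.getElem?_set_ne (by omega)]
          have := h1 j
          rw [List.getD] at this
          rw [this]
          by_cases h3 : j ≤ m
          · rw [if_pos h3, if_pos (by omega)]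
          · rw [if_neg h3, if_neg (by omega)]

theorem maxBalancedShipments_eq_dpF (weight : List Int) :
    maxBalancedShipments weight = dpF (wf weight) weight.length := by
  have := (dp_inv weight weight.length le_rfl).2 weight.length
  simpa [maxBalancedShipments] using this

-- ===== B side: index-based greedy state =====
def gState (w : Nat → Int) : Nat → Int × Option Int
  | 0 => (0, none)
  | i+1 => gStep (gState w i) (w i)

-- start index of the currently open segment
def gStart (w : Nat → Int) : Nat → Nat
  | 0 => 0
  | i+1 =>
    match (gState w i).2 with
    | some m => if w i < m then i+1 else gStart w i
    | none => gStart w i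

theorem gState_congr {w w' : Nat → Int} :
    ∀ i, (∀ j, j < i → w j = w' j) → gState w i = gState w' i := by
  intro i
  induction i with
  | zero => intro _; rfl
  | succ i ih =>
      intro h
      simp only [gState]
      rw [ih (fun j hj => h j (by omega)), h i (by omega)]

theorem foldl_gStep (l : List Int) :
    l.foldl gStep (0, none) = gState (wf l) l.length := by
  induction l using List.reverseRecOn with
  | nil => rfl
  | append_singleton ys x ih =>
      rw [List.foldl_append, List.foldl_cons, List.foldl_nil, ih]
      have hx : wf (ys ++ [x]) ys.length = x := by
        simp [wf, List.getD]
      have hcongr : gState (wf ys) ys.length = gState (wf (ys ++ [x])) ys.length := by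
        apply gState_congr
        intro j hj
        simp [wf, List.getD, List.getElem?_append_left hj]
      simp only [List.length_append, List.length_cons, List.length_nil]
      rw [gState, hcongr, hx]

-- the running max is exactly the max of the open segment [gStart, i)
def SegMax (w : Nat → Int) (s i : Nat) (cur : Option Int) : Prop :=
  match cur with
  | none => s = i
  | some m => s < i ∧ (∀ j, s ≤ j → j < i → w j ≤ m) ∧ ∃ j, s ≤ j ∧ j < i ∧ w j = m

def GInv (w : Nat → Int) (i : Nat) : Prop :=
  gStart w i ≤ i ∧
  (∀ j, gStart w i ≤ j → j ≤ i → dpF w j = (gState w i).1) ∧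
  (gStart w i = 0 → (gState w i).1 = 0) ∧
  (0 < gStart w i → dpF w (gStart w i - 1) + 1 = (gState w i).1) ∧
  SegMax w (gStart w i) i (gState w i).2

theorem ginv_holds (w : Nat → Int) : ∀ i, GInv w i := by
  intro i
  unfold GInv
  induction i with
  | zero =>
      refine ⟨le_rfl, fun j h1 h2 => ?_, fun _ => rfl, fun h => by simp [gStart] at h, rfl⟩
      have : j = 0 := by omega
      subst this; rw [dpF_zero]; rfl
  | succ i ih =>
      obtain ⟨hs, hflat, hzero, hprev, hseg⟩ := ih
      cases hcur : (gState w i).2 with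
      | none =>
          -- open segment empty: gStart w i = i; no close
          have hsi : gStart w i = i := by simpa [SegMax, hcur] using hseg
          have hgs : gStart w (i+1) = gStart w i := by simp [gStart, hcur]
          have hst : gState w (i+1) = ((gState w i).1, some (w i)) := by
            simp [gState, gStep, hcur]
          have hdp : dpF w (i+1) = (gState w i).1 := by
            cases h : ngF w i with
            | none => rw [dpF_succ_none h, hflat i hs le_rfl]
            | some j0 =>
                -- j0 < i = gStart w i: the nearest greater lies before the last close
                have hl : j0 < i := (ngAux_some (x := w i) h).1
                have h0 : 0 < gStart w i := by omega
                have hmono : dpF w j0 ≤ dpF w (gStart w i - 1) := dpF_mono w (by omega)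
                have := hprev h0
                rw [dpF_succ_some h, hflat i hs le_rfl]
                omega
          refine ⟨by rw [hgs]; omega, ?_, ?_, ?_, ?_⟩
          · intro j h1 h2
            rw [hst]
            rcases Nat.lt_or_ge j (i+1) with hj | hj
            · exact hflat j (by omega) (by omega)
            · have : j = i + 1 := by omega
              subst this; exact hdp
          · intro h; rw [hst]; exact hzero (by omega)
          · intro h; rw [hst, hgs]; exact hprev (by omega)
          · rw [hst, hgs]
            exact ⟨by omega, fun j h1 h2 => by
                have : j = i := by omega
                subst this; exact le_rfl,
              ⟨i, by omega, by omega, rfl⟩⟩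
      | some m =>
          obtain ⟨hlt, hbound, jm, hjm1, hjm2, hjm3⟩ : gStart w i < i ∧ _ ∧ _ := by
            simpa [SegMax, hcur] using hseg
          by_cases hcl : w i < m
          · -- CLOSE
            have hgs : gStart w (i+1) = i + 1 := by simp [gStart, hcur, hcl]
            have hst : gState w (i+1) = ((gState w i).1 + 1, none) := by
              simp [gState, gStep, hcur, hcl]
            -- ngF w i = some j0 with gStart w i ≤ j0 < i
            have hng : ∃ j0, ngF w i = some j0 ∧ gStart w i ≤ j0 ∧ j0 < i := by
              cases h : ngF w i with
              | none =>
                  exfalso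
                  have := ngAux_none (x := w i) h jm hjm2
                  omega
              | some j0 =>
                  obtain ⟨hl, hx, hmax⟩ := ngAux_some (x := w i) h
                  refine ⟨j0, rfl, ?_, hl⟩
                  by_contra hlt0
                  have : w jm ≤ w i := hmax jm (by omega) hjm2
                  omega
            obtain ⟨j0, hng, hj1, hj2⟩ := hng
            have hdp : dpF w (i+1) = (gState w i).1 + 1 := by
              rw [dpF_succ_some hng, hflat j0 hj1 (by omega), hflat i hs le_rfl]
              omega
            refine ⟨by omega, ?_, ?_, ?_, ?_⟩
            · intro j h1 h2
              have : j = i + 1 := by omega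
              subst this; rw [hst, hdp]
            · intro h; rw [hgs] at h; omega
            · intro _
              rw [hgs, hst]
              simp only [Nat.add_sub_cancel]
              rw [hflat i hs le_rfl]
            · rw [hst, hgs]; rfl
          · -- NO CLOSE, w i ≥ m
            have hge : m ≤ w i := not_lt.mp hcl
            have hgs : gStart w (i+1) = gStart w i := by simp [gStart, hcur, hcl]
            have hst : gState w (i+1) = ((gState w i).1, some (w i)) := by
              simp [gState, gStep, hcur, hcl]
            have hdp : dpF w (i+1) = (gState w i).1 := by
              cases h : ngF w i with
              | none => rw [dpF_succ_none h, hflat i hs le_rfl]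
              | some j0 =>
                  obtain ⟨hl, hx, _⟩ := ngAux_some (x := w i) h
                  have hj0s : j0 < gStart w i := by
                    by_contra hc
                    have := hbound j0 (not_lt.mp hc) hl
                    omega
                  have h0 : 0 < gStart w i := by omega
                  have hmono : dpF w j0 ≤ dpF w (gStart w i - 1) :=
                    dpF_mono w (by omega)
                  have := hprev h0
                  rw [dpF_succ_some h, hflat i hs le_rfl]
                  omega
            refine ⟨by omega, ?_, ?_, ?_, ?_⟩
            · intro j h1 h2
              rw [hst]
              rcases Nat.lt_or_ge j (i+1) with hj | hj
              · exact hflat j (by omega) (by omega)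
              · have : j = i + 1 := by omega
                subst this; exact hdp
            · intro h; rw [hst]; exact hzero (by omega)
            · intro h; rw [hst, hgs]; exact hprev (by omega)
            · rw [hst, hgs]
              refine ⟨by omega, fun j h1 h2 => ?_, ⟨i, by omega, by omega, rfl⟩⟩
              rcases Nat.lt_or_ge j i with hj | hj
              · exact le_trans (hbound j h1 hj) hge
              · have : j = i := by omega
                subst this; exact le_rfl

theorem dpF_eq_gState (w : Nat → Int) (n : Nat) : dpF w n = (gState w n).1 := by
  obtain ⟨hs, hflat, _⟩ := ginv_holds w n
  exact hflat n hs le_rfl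

-- ===== VERDICT (by name: the statement is the Claim_ definition above) =====
theorem maxBalancedShipments_spec : Claim_equal_maxBalancedShipments := by
  intro weight _
  unfold Spec_maxBalancedShipments
  rw [maxBalancedShipments_eq_dpF, maxBalancedShipments_alt,
    foldl_gStep weight, dpF_eq_gState]
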